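-- pv_equiv track=rewrite | github.com/mbhs/mbit | archive/2020/solutions/HappyBunnies.py | solve
-- ===== SOURCE A (Python) =====
-- def solve(n):
--     ret = n
--     while n > 0:
--         if n % 10 == 7:
--             return 0
--         ret += n % 10
--         n //= 10
--     return ret
-- ===== SOURCE B (Python) =====
-- def solve(n):
--     if n <= 0:
--         return n
--     s = str(n)
--     if '7' in s:
--         return 0
--     return n + sum(ord(c) - 48 for c in s)
-- ===== Notes on version B (the rewrite author's own statement) =====
-- stated objective: idiomatic
-- what changed: B works on the decimal string str(n): a '7'-membership scan plus a character digit-sum pass, replacing A's early-returning modulo/floordiv accumulator loop.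
import Mathlib
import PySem

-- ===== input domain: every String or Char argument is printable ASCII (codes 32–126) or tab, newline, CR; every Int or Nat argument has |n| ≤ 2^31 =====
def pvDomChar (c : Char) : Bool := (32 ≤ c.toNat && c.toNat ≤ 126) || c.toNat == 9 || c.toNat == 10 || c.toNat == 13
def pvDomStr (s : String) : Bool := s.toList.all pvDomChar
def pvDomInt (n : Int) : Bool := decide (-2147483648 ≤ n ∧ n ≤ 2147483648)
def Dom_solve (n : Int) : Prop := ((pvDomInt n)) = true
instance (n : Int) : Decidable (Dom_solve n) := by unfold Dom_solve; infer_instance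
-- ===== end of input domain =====

-- B replaces A's modulo/floordiv accumulator loop by a membership scan and digit-sum pass over str(n); objective: idiomatic.

-- ===== PORT A =====
-- while n > 0: if n % 10 == 7: return 0; ret += n % 10; n //= 10
def solveLoopA (n ret : Int) : Int :=
  if _h : 0 < n then
    if PySem.Int.mod n 10 == 7 then 0
    else solveLoopA (PySem.Int.floordiv n 10) (ret + PySem.Int.mod n 10)
  else ret
termination_by n.toNat
decreasing_by
  simp only [PySem.Int.floordiv, Int.fdiv_eq_ediv]
  omega

def solve (n : Int) : Int := solveLoopA n n

-- ===== PORT B =====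
def solve_alt (n : Int) : Int :=
  if n ≤ 0 then n
  else
    let s := PySem.Int.toChars n
    if s.contains '7' then 0
    else n + (s.map (fun c => (c.toNat : Int) - 48)).sum

-- ===== PRECONDITION & SPEC =====
def Spec_solve (n : Int) (out : Int) : Prop := out = solve_alt n
instance (n : Int) (out : Int) : Decidable (Spec_solve n out) := by unfold Spec_solve; infer_instance

-- ===== CLAIM (what is proved, stated in full; the proofs are below) =====
def Claim_equal_solve : Prop := ∀ (n : Int), Dom_solve n → Spec_solve n (solve n)

-- ===== LEMMAS AND PROOFS =====

theorem toDigitsCore_append (b : Nat) (f : Nat) :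
    ∀ (n : Nat) (ds : List Char),
      Nat.toDigitsCore b f n ds = Nat.toDigitsCore b f n [] ++ ds := by
  induction f with
  | zero => intro n ds; simp [Nat.toDigitsCore]
  | succ f ih =>
    intro n ds
    simp only [Nat.toDigitsCore]
    by_cases h : n / b = 0
    · simp [h]
    · simp only [h, if_false]
      rw [ih (n / b) ((n % b).digitChar :: ds), ih (n / b) [(n % b).digitChar]]
      simp

theorem toDigitsCore_fuel (b : Nat) (hb : 2 ≤ b) :
    ∀ (n f f' : Nat), n < f → n < f' →
      Nat.toDigitsCore b f n [] = Nat.toDigitsCore b f' n [] := by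
  intro n
  induction n using Nat.strong_induction_on with
  | _ n ih =>
    intro f f' hf hf'
    match f, f', hf, hf' with
    | f + 1, f' + 1, hf, hf' =>
      simp only [Nat.toDigitsCore]
      by_cases h : n / b = 0
      · simp [h]
      · simp only [h, if_false]
        rw [toDigitsCore_append b f, toDigitsCore_append b f']
        have hpos : 0 < n := by
          rcases Nat.eq_zero_or_pos n with h0 | h0
          · exact absurd (by simp [h0]) h
          · exact h0
        have hdiv : n / b < n := Nat.div_lt_self hpos (by omega)
        rw [ih (n / b) hdiv f f'
          (lt_of_lt_of_le hdiv (by omega)) (lt_of_lt_of_le hdiv (by omega))]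

theorem toDigits_step (m : Nat) (hm : 0 < m) :
    Nat.toDigits 10 m =
      (if m < 10 then [] else Nat.toDigits 10 (m / 10)) ++ [(m % 10).digitChar] := by
  by_cases h : m < 10
  · have h0 : m / 10 = 0 := Nat.div_eq_of_lt h
    simp [Nat.toDigits, Nat.toDigitsCore, h0, h]
  · have h0 : m / 10 ≠ 0 := by omega
    simp only [h, if_false]
    show Nat.toDigitsCore 10 (m + 1) m [] = _
    simp only [Nat.toDigitsCore, h0, if_false]
    rw [toDigitsCore_append 10 m]
    have hdiv : m / 10 < m := Nat.div_lt_self hm (by omega)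
    rw [toDigitsCore_fuel 10 (by omega) (m / 10) m (m / 10 + 1) (by omega) (by omega)]
    rfl

theorem digitChar_toNat (d : Nat) (hd : d < 10) : ((d.digitChar).toNat : Int) - 48 = d := by
  interval_cases d <;> decide

theorem seven_beq_digitChar (d : Nat) (hd : d < 10) :
    ('7' == d.digitChar) = decide (d = 7) := by
  interval_cases d <;> decide

-- A's loop on a positive natural computes B's string scan and digit sum
theorem loop_eq (m : Nat) (hm : 0 < m) : ∀ (ret : Int),
    solveLoopA (m : Int) ret =
      if (Nat.toDigits 10 m).contains '7' then 0
      else ret + ((Nat.toDigits 10 m).map (fun c => (c.toNat : Int) - 48)).sum := by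
  induction m using Nat.strong_induction_on with
  | _ m ih =>
    intro ret
    have hmod : PySem.Int.mod (m : Int) 10 = ((m % 10 : Nat) : Int) := by
      simp only [PySem.Int.mod, Int.fmod_eq_emod]
      omega
    have hdivI : PySem.Int.floordiv (m : Int) 10 = ((m / 10 : Nat) : Int) := by
      simp only [PySem.Int.floordiv, Int.fdiv_eq_ediv]
      omega
    have hd10 : m % 10 < 10 := Nat.mod_lt _ (by omega)
    have hc7 : (((m % 10 : Nat) : Int) == 7) = decide (m % 10 = 7) := by
      by_cases h7 : m % 10 = 7 <;> simp [h7] <;> try omega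
    rw [solveLoopA.eq_def]
    rw [dif_pos (by exact_mod_cast hm : (0:Int) < (m : Int))]
    rw [hmod, hdivI, hc7, toDigits_step m hm]
    by_cases h : m < 10
    · have hmm : m % 10 = m := Nat.mod_eq_of_lt h
      have h0 : m / 10 = 0 := Nat.div_eq_of_lt h
      rw [if_pos h, List.nil_append, List.contains_cons, List.contains_nil,
        seven_beq_digitChar _ hd10, Bool.or_false]
      by_cases h7 : m % 10 = 7
      · rw [decide_eq_true h7]; simp
      · rw [decide_eq_false h7]
        simp only [Bool.false_eq_true, if_false]
        rw [h0, solveLoopA.eq_def]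
        simp [digitChar_toNat _ hd10]
    · have hdp : 0 < m / 10 := by omega
      have hdiv : m / 10 < m := Nat.div_lt_self hm (by omega)
      rw [if_neg h, List.contains_append, List.contains_cons, List.contains_nil,
        seven_beq_digitChar _ hd10, Bool.or_false]
      by_cases h7 : m % 10 = 7
      · rw [decide_eq_true h7]; simp
      · rw [decide_eq_false h7]
        simp only [Bool.false_eq_true, if_false, Bool.or_false]
        rw [ih (m / 10) hdiv hdp (ret + ((m % 10 : Nat) : Int))]
        by_cases hc : (Nat.toDigits 10 (m / 10)).contains '7'
        · simp only [hc, if_true]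
        · simp only [hc, Bool.false_eq_true, if_false]
          rw [List.map_append, List.sum_append, List.map_cons, List.map_nil,
            List.sum_cons, List.sum_nil, digitChar_toNat _ hd10]
          ring

-- ===== VERDICT (by name: the statement is the Claim_ definition above) =====
theorem solve_spec : Claim_equal_solve := by
  intro n _
  unfold Spec_solve solve solve_alt
  by_cases hn : n ≤ 0
  · rw [solveLoopA.eq_def]
    simp [hn, show ¬ (0 < n) by omega]
  · simp only [hn, if_false]
    have htc : PySem.Int.toChars n = Nat.toDigits 10 n.toNat := by
      simp [PySem.Int.toChars, show ¬ n < 0 by omega]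
    have hl := loop_eq n.toNat (by omega) n
    rw [show ((n.toNat : Nat) : Int) = n by omega] at hl
    rw [htc, hl]
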